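-- pv_equiv track=rewrite | github.com/nghialedmxph-sketch/DPM245462_LeHuuNghia_DH25PM__Nhom4-To2_NopBaiTap_Phython | chuong4-cau12.py | oscillate
-- ===== SOURCE A (Python) =====
-- def oscillate(start, count):
--     result = []
--     x = start
--     for i in range(count):
--         result.append(x)
--         result.append(-x)
--         x += 1 if x < 0 else 0
--     return result[:count*3]
-- ===== SOURCE B (Python) =====
-- def oscillate(start, count):
--     # Two-phase closed form: a ramp start..start+r-1 (while values are negative),
--     # then a flat run of the stop value; each value contributes (x, -x).
--     if count <= 0:
--         return []
--     m = max(0, -start)          # index at which x stops incrementing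
--     r = min(count, m)           # length of the ramp phase
--     out = []
--     for x in range(start, start + r):
--         out.append(x)
--         out.append(-x)
--     s = start + r
--     out.extend([s, -s] * (count - r))
--     return out
-- ===== Notes on version B (the rewrite author's own statement) =====
-- stated objective: faster
-- what changed: Replaces A's running accumulator (x += 1 while x < 0, with a no-op [:count*3] slice) by a two-phase closed form: a ramp start..start+r-1 built from range(), then a flat run of the stop value built by list repetition.
import Mathlib
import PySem

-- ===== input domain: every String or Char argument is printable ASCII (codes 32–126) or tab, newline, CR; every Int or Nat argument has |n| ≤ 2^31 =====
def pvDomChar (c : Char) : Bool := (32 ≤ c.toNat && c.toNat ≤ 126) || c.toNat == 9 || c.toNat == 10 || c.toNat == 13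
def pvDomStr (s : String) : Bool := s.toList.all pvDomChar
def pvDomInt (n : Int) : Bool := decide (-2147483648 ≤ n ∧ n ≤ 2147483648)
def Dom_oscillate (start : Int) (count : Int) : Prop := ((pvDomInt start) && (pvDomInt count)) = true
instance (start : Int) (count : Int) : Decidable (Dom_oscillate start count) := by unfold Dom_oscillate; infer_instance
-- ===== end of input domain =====

-- B replaces A's running accumulator (x += 1 while negative) by a two-phase closed form
-- (ramp start..start+r-1, then a flat run of the stop value); objective: simpler/alternative.

-- ===== PORT A =====
def oscillate (start : Int) (count : Int) : List Int :=
  let st := (PySem.List.pyRange 0 count 1).foldl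
    (fun (st : List Int × Int) _ =>
      (st.1 ++ [st.2, -st.2], st.2 + (if st.2 < 0 then 1 else 0)))
    ([], start)
  PySem.List.slice st.1 none (some (count * 3))

-- ===== PORT B =====
def oscillate_alt (start : Int) (count : Int) : List Int :=
  if count ≤ 0 then []
  else
    let m := max 0 (-start)
    let r := min count m
    let ramp := (PySem.List.pyRange start (start + r) 1).foldl
      (fun acc x => acc ++ [x, -x]) []
    let s := start + r
    ramp ++ (List.replicate (count - r).toNat [s, -s]).flatten

-- ===== PRECONDITION & SPEC =====
def Spec_oscillate (start : Int) (count : Int) (out : List Int) : Prop := out = oscillate_alt start count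
instance (start : Int) (count : Int) (out : List Int) : Decidable (Spec_oscillate start count out) := by unfold Spec_oscillate; infer_instance

-- ===== CLAIM (what is proved, stated in full; the proofs are below) =====
def Claim_equal_oscillate : Prop := ∀ (start : Int) (count : Int), Dom_oscillate start count → Spec_oscillate start count (oscillate start count)

-- ===== LEMMAS AND PROOFS =====

-- A's loop, with the accumulator factored out: the pairs appended starting from state x, n steps.
def aLoop (x : Int) : Nat → List Int
  | 0 => []
  | n + 1 => x :: -x :: aLoop (x + if x < 0 then 1 else 0) n

lemma foldA (l : List Int) : ∀ (acc : List Int) (x : Int),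
    (l.foldl (fun (st : List Int × Int) _ =>
      (st.1 ++ [st.2, -st.2], st.2 + (if st.2 < 0 then 1 else 0))) (acc, x)).1
    = acc ++ aLoop x l.length := by
  induction l with
  | nil => intro acc x; simp [aLoop]
  | cons a t ih =>
      intro acc x
      simp only [List.foldl_cons, List.length_cons, aLoop, ih]
      simp

lemma length_aLoop (n : Nat) : ∀ x : Int, (aLoop x n).length = 2 * n := by
  induction n with
  | zero => intro x; simp [aLoop]
  | succ n ih => intro x; simp [aLoop, ih]; omega

-- closed form of A's loop: a ramp followed by a flat run
lemma aLoop_spec (n : Nat) : ∀ x : Int,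
    aLoop x n =
      (PySem.List.pyRange x (x + min (n : Int) (max 0 (-x))) 1).flatMap (fun y => [y, -y])
      ++ (List.replicate ((n : Int) - min (n : Int) (max 0 (-x))).toNat
            [x + min (n : Int) (max 0 (-x)), -(x + min (n : Int) (max 0 (-x)))]).flatten := by
  induction n with
  | zero =>
      intro x
      simp [aLoop, PySem.List.pyRange_one_eq_nil]
  | succ n ih =>
      intro x
      by_cases hx : x < 0
      · -- ramp step
        have hx1 : x + (if x < 0 then (1:Int) else 0) = x + 1 := by simp [hx]
        have hcnt : ((n : Int) + 1 - min ((n : Int) + 1) (max 0 (-x)))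
            = ((n : Int) - min (n : Int) (max 0 (-(x + 1)))) := by omega
        have hstop : x + min ((n : Int) + 1) (max 0 (-x)) = x + 1 + min (n : Int) (max 0 (-(x + 1))) := by
          omega
        have hcons : PySem.List.pyRange x (x + min ((n : Int) + 1) (max 0 (-x))) 1
            = x :: PySem.List.pyRange (x + 1) (x + 1 + min (n : Int) (max 0 (-(x + 1)))) 1 := by
          rw [hstop, PySem.List.pyRange_one_cons (by omega)]
        simp only [Nat.cast_succ]
        rw [hcons, hcnt, hstop]
        simp only [aLoop, hx1, ih (x + 1)]
        simp
      · -- flat step: x stays put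
        have hm : max 0 (-x) = 0 := by omega
        have hx1 : x + (if x < 0 then (1:Int) else 0) = x := by simp [hx]
        have h1 : min ((n : Int) + 1) (max 0 (-x)) = 0 := by rw [hm]; omega
        have h2 : min ((n : Int)) (max 0 (-x)) = 0 := by rw [hm]; omega
        have hc : ((n : Int) + 1 - 0).toNat = ((n : Int) - 0).toNat + 1 := by omega
        simp only [aLoop, hx1, ih x, Nat.cast_succ, h1, h2, hc]
        simp [PySem.List.pyRange_one_eq_nil, List.replicate_succ]

-- ===== VERDICT (by name: the statement is the Claim_ definition above) =====
theorem oscillate_spec : Claim_equal_oscillate := by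
  intro start count _
  unfold Spec_oscillate oscillate oscillate_alt
  by_cases hc : count ≤ 0
  · have : PySem.List.pyRange 0 count 1 = [] := PySem.List.pyRange_one_eq_nil (by omega)
    simp [this, hc, PySem.List.slice]
  · simp only [if_neg hc]
    have hn : ((count.toNat : Int)) = count := Int.toNat_of_nonneg (by omega)
    have hfold := foldA (PySem.List.pyRange 0 count 1) [] start
    have hlen2 : (PySem.List.pyRange 0 count 1).length = count.toNat := by
      rw [PySem.List.length_pyRange_one]; omega
    rw [hlen2] at hfold
    have hA := aLoop_spec count.toNat start
    rw [hn] at hA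
    -- the slice is a no-op: the list has length 2*count ≤ 3*count
    have hsl : PySem.List.slice (aLoop start count.toNat) none (some (count * 3))
        = aLoop start count.toNat := by
      rw [PySem.List.slice_to _ (by omega)]
      apply List.take_of_length_le
      rw [length_aLoop]
      omega
    rw [hfold, List.nil_append, hsl, hA]
    rw [PySem.List.foldl_append_eq_flatMap]
    simp
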